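-- pv_equiv track=rewrite | github.com/pytergeist/GoogleFooBar2023 | Re-ID/solution.py | get_primes_string
-- ===== SOURCE A (Python) =====
-- def generate_primes():
--     """Generates an infinite sequence of prime numbers using the Sieve of Eratosthenes.
--
--     Yields:
--         int: The next prime number.
--     """
--     composite_to_primes = {}
--     test_prime = 2  # Starting integer to check for primality
--
--     while True:
--         if test_prime not in composite_to_primes:
--             # test_prime is a new prime. Yield it and mark its first multiple.
--             yield test_prime
--             composite_to_primes[test_prime * test_prime] = [test_prime]
--         else:
--             # test_prime is not a prime. Increment multiples of its smallest prime factor.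
--             for prime in composite_to_primes[test_prime]:
--                 composite_to_primes.setdefault(prime + test_prime, []).append(prime)
--             # Remove this number from the dictionary as we are done with it.
--             del composite_to_primes[test_prime]
--         test_prime += 1
--
-- def get_primes_string(max_length):
--     """Generates a string of prime numbers concatenated together up to a max length.
--
--     Args:
--         max_length (int): The desired minimum length of the prime number string.
--
--     Returns:
--         str: A string of concatenated prime numbers up to the desired length.
--     """
--     prime_gen = generate_primes()
--     primes_string = ""
--     for prime in prime_gen:
--         primes_string += str(prime)
--         if len(primes_string) >= max_length:
--             break
--     return primes_string
-- ===== SOURCE B (Python) =====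
-- def get_primes_string(max_length):
--     """Concatenate ascending primes (found by trial division against the
--     primes already collected, stopping at sqrt) until the string's length
--     reaches max_length."""
--     primes = []
--     primes_string = ""
--     n = 2
--     while True:
--         is_prime = True
--         for p in primes:
--             if p * p > n:
--                 break
--             if n % p == 0:
--                 is_prime = False
--                 break
--         if is_prime:
--             primes.append(n)
--             primes_string += str(n)
--             if len(primes_string) >= max_length:
--                 return primes_string
--         n += 1
-- ===== Notes on version B (the rewrite author's own statement) =====
-- stated objective: alternative
-- what changed: Replaces the dict-based incremental Sieve of Eratosthenes generator with a direct trial-division loop that tests each candidate against the primes collected so far (stopping at sqrt), appending to the string in the same ascending order.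
import Mathlib
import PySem

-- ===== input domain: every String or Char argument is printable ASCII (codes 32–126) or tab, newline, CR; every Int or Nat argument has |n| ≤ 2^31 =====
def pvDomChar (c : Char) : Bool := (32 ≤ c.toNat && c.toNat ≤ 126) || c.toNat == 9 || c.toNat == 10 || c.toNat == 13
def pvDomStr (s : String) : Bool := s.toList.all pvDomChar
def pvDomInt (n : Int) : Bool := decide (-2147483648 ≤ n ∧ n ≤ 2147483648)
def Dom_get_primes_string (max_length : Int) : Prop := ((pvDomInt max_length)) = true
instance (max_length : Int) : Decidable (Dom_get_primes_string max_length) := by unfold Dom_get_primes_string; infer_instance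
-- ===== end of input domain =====

-- B replaces A's dict-based incremental sieve with trial division against the primes
-- already collected (objective: alternative algorithm, similar cost).
-- Both loops run on a fuel of 3*(max_length+4) candidates, which is never exhausted in
-- practice (the primes below x already concatenate to far more than x/3 characters).

-- ===== PORT A =====
-- fuel-counted transcription of A's `for prime in generate_primes()` consumer loop with
-- the generator's dict-sieve state (composite_to_primes, test_prime) inlined
def pyFuel (m : Int) : Nat := 3 * (m.toNat + 4)

-- `composite_to_primes.setdefault(prime + test_prime, []).append(prime)` over the list
def sieveFold (tp : Int) (d : PySem.Dict Int (List Int)) (L : List Int) : PySem.Dict Int (List Int) :=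
  L.foldl (fun d p => d.modify (p + tp) [] (fun l => l ++ [p])) d

def goA (m : Int) : Nat → PySem.Dict Int (List Int) → List Char → Int → List Char
  | 0, _, s, _ => s
  | fuel+1, d, s, tp =>
    match d.get? tp with
    | none =>
        let s' := s ++ PySem.Int.toChars tp
        if (s'.length : Int) ≥ m then s'
        else goA m fuel (d.insert (tp*tp) [tp]) s' (tp+1)
    | some L => goA m fuel ((sieveFold tp d L).erase tp) s (tp+1)

def get_primes_string (max_length : Int) : String :=
  String.mk (goA max_length (pyFuel max_length) PySem.Dict.empty [] 2)

-- ===== PORT B =====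
-- `for p in primes: if p*p > n: break; if n % p == 0: is_prime = False; break`
def trialDiv (n : Int) : List Int → Bool
  | [] => true
  | p :: ps =>
    if p * p > n then true
    else if PySem.Int.mod n p == 0 then false
    else trialDiv n ps

def goB (m : Int) : Nat → List Int → List Char → Int → List Char
  | 0, _, s, _ => s
  | fuel+1, primes, s, n =>
    if trialDiv n primes then
      let s' := s ++ PySem.Int.toChars n
      if (s'.length : Int) ≥ m then s'
      else goB m fuel (primes ++ [n]) s' (n+1)
    else goB m fuel primes s (n+1)

def get_primes_string_alt (max_length : Int) : String :=
  String.mk (goB max_length (pyFuel max_length) [] [] 2)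

-- ===== PRECONDITION & SPEC =====
def Spec_get_primes_string (max_length : Int) (out : String) : Prop := out = get_primes_string_alt max_length
instance (max_length : Int) (out : String) : Decidable (Spec_get_primes_string max_length out) := by unfold Spec_get_primes_string; infer_instance

-- ===== CLAIM (what is proved, stated in full; the proofs are below) =====
def Claim_equal_get_primes_string : Prop := ∀ (max_length : Int), Dom_get_primes_string max_length → Spec_get_primes_string max_length (get_primes_string max_length)

-- ===== LEMMAS AND PROOFS =====

-- `lmult n p` = the least multiple of p that is ≥ n (for 0 < p)
def lmult (n p : Int) : Int := n + (-n) % p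
-- `key n p` = the dict key currently owning prime p when the sieve is about to test n
def key (n p : Int) : Int := max (p * p) (lmult n p)

lemma lmult_dvd (n p : Int) : p ∣ lmult n p :=
  ⟨-((-n) / p), by unfold lmult; rw [Int.emod_def]; ring⟩

lemma lmult_bounds (n : Int) {p : Int} (hp : 0 < p) : n ≤ lmult n p ∧ lmult n p < n + p := by
  unfold lmult
  have h1 := Int.emod_nonneg (-n) (ne_of_gt hp)
  have h2 := Int.emod_lt_of_pos (-n) hp
  omega

lemma mult_unique {p a b n : Int} (h1 : p ∣ a) (h2 : p ∣ b)
    (ha : n ≤ a) (ha' : a < n + p) (hb : n ≤ b) (hb' : b < n + p) : a = b := by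
  have h3 : p ∣ a - b := dvd_sub h1 h2
  have h4 : |a - b| < p := abs_lt.mpr ⟨by omega, by omega⟩
  have := Int.eq_zero_of_abs_lt_dvd h3 h4
  omega

lemma lmult_eq_iff {n p m : Int} (hp : 0 < p) (hm : p ∣ m) (h1 : n ≤ m) (h2 : m < n + p) :
    lmult n p = m :=
  mult_unique (lmult_dvd n p) hm (lmult_bounds n hp).1 (lmult_bounds n hp).2 h1 h2

lemma key_eq_self_iff {n p : Int} (hp : 0 < p) : key n p = n ↔ p * p ≤ n ∧ p ∣ n := by
  have hl := lmult_bounds n hp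
  constructor
  · intro h
    have hsq := le_max_left (p * p) (lmult n p)
    have hml := le_max_right (p * p) (lmult n p)
    rw [show max (p * p) (lmult n p) = key n p from rfl, h] at hsq hml
    have hmn : lmult n p = n := le_antisymm hml hl.1
    exact ⟨hsq, hmn ▸ lmult_dvd n p⟩
  · rintro ⟨hle, hdvd⟩
    have hmn : lmult n p = n := lmult_eq_iff hp hdvd le_rfl (by omega)
    unfold key; rw [hmn]; exact max_eq_right hle

lemma key_succ_of_ne {n p : Int} (hp : 2 ≤ p) (h : key n p ≠ n) : key (n+1) p = key n p := by
  have hp0 : (0:Int) < p := by omega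
  have hl := lmult_bounds n hp0
  by_cases hc : lmult n p = n
  · -- p divides n but p*p > n : key n p = p*p, and p*p ≥ n + p
    have hdvd : p ∣ n := hc ▸ lmult_dvd n p
    have hsq : n < p * p := by
      by_contra hcon
      exact h ((key_eq_self_iff hp0).mpr ⟨by omega, hdvd⟩)
    have hsq' : n + p ≤ p * p := by
      rcases hdvd with ⟨k, rfl⟩
      have : k + 1 ≤ p := by nlinarith
      nlinarith
    have hml : lmult (n+1) p = n + p :=
      lmult_eq_iff hp0 (by rcases hdvd with ⟨k, rfl⟩; exact ⟨k+1, by ring⟩) (by omega) (by omega)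
    unfold key
    rw [hml, hc, max_eq_left (by omega), max_eq_left (by omega)]
  · have hml : lmult (n+1) p = lmult n p :=
      lmult_eq_iff hp0 (lmult_dvd n p) (by omega) (by omega)
    unfold key; rw [hml]

lemma key_succ_of_dvd {n p : Int} (hp : 2 ≤ p) (hdvd : p ∣ n) (hle : p * p ≤ n) :
    key (n+1) p = n + p := by
  have hp0 : (0:Int) < p := by omega
  have hml : lmult (n+1) p = n + p :=
    lmult_eq_iff hp0 (by rcases hdvd with ⟨k, rfl⟩; exact ⟨k+1, by ring⟩) (by omega) (by omega)
  unfold key; rw [hml]; exact max_eq_right (by omega)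

lemma key_succ_self {n : Int} (hn : 2 ≤ n) : key (n+1) n = n * n := by
  have hp0 : (0:Int) < n := by omega
  have hml : lmult (n+1) n = n + n :=
    lmult_eq_iff hp0 ⟨2, by ring⟩ (by omega) (by omega)
  unfold key; rw [hml]; exact max_eq_left (by nlinarith)

lemma key_lt_sq {n p : Int} (hp : 2 ≤ p) (hpn : p < n) : key n p < n * n := by
  have hp0 : (0:Int) < p := by omega
  have hl := lmult_bounds n hp0
  have h1 : p * p < n * n := by nlinarith
  have h2 : n + p < n * n := by nlinarith
  unfold key; exact max_lt h1 (by omega)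

-- dict helper lemmas specific to this file (erase / modify seen through get?)
lemma get?_erase_self (d : PySem.Dict Int (List Int)) (k : Int) : (d.erase k).get? k = none := by
  simp only [PySem.Dict.erase, PySem.Dict.get?, Option.map_eq_none_iff]
  rw [List.find?_eq_none]
  intro p hp
  have := (List.mem_filter.mp hp).2
  simpa using this

lemma get?_erase_of_ne (d : PySem.Dict Int (List Int)) {k k' : Int} (h : k' ≠ k) :
    (d.erase k).get? k' = d.get? k' := by
  rcases d with ⟨items⟩
  simp only [PySem.Dict.erase, PySem.Dict.get?]
  congr 1
  induction items with
  | nil => rfl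
  | cons hd tl ih =>
      by_cases h1 : hd.1 = k
      · have h2 : (hd.1 == k') = false := by simp [h1]; omega
        have h3 : (k == k') = false := by simp; omega
        simp [h1, h3, ih]
      · by_cases h2 : hd.1 = k'
        · simp [h, h2]
        · simp [h1, h2, ih]

lemma get?_modify_self (d : PySem.Dict Int (List Int)) (k : Int) (f : List Int → List Int) :
    (d.modify k [] f).get? k = some (f (d.getD k [])) := by
  simp [PySem.Dict.modify, PySem.Dict.get?_insert_self]

lemma get?_modify_of_ne (d : PySem.Dict Int (List Int)) {k k' : Int} (f : List Int → List Int)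
    (h : k' ≠ k) : (d.modify k [] f).get? k' = d.get? k' := by
  simp [PySem.Dict.modify, PySem.Dict.get?_insert_of_ne _ _ h]

-- characterisation of the composite-step fold
lemma sieveFold_get? (L : List Int) (tp : Int) (d : PySem.Dict Int (List Int)) (c : Int) :
    (sieveFold tp d L).get? c =
      if L.filter (fun p => p + tp == c) = [] then d.get? c
      else some (d.getD c [] ++ L.filter (fun p => p + tp == c)) := by
  induction L generalizing d with
  | nil => simp [sieveFold]
  | cons p ps ih =>
      have hstep : sieveFold tp d (p :: ps) = sieveFold tp (d.modify (p + tp) [] (fun l => l ++ [p])) ps := by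
        simp [sieveFold]
      rw [hstep, ih]
      by_cases h : p + tp = c
      · subst h
        have hD : (d.modify (p + tp) [] (fun l => l ++ [p])).getD (p + tp) [] = d.getD (p + tp) [] ++ [p] := by
          rw [PySem.Dict.getD_eq_get?_getD, get?_modify_self]; rfl
        have hg : (d.modify (p + tp) [] (fun l => l ++ [p])).get? (p + tp) = some (d.getD (p + tp) [] ++ [p]) :=
          get?_modify_self d (p + tp) (fun l => l ++ [p])
        simp only [List.filter_cons, beq_self_eq_true]
        by_cases hf : ps.filter (fun q => q + tp == p + tp) = []
        · simp [hf, hg]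
        · simp [hf, hD]
      · have hne : (p + tp == c) = false := by simpa using h
        have hD : (d.modify (p + tp) [] (fun l => l ++ [p])).getD c [] = d.getD c [] := by
          rw [PySem.Dict.getD_eq_get?_getD, get?_modify_of_ne _ _ (by omega), ← PySem.Dict.getD_eq_get?_getD]
        have hg := get?_modify_of_ne d (fun l => l ++ [p]) (show c ≠ p + tp by omega)
        simp only [List.filter_cons, hne]
        by_cases hf : ps.filter (fun q => q + tp == c) = []
        · simp [hf, hg]
        · simp [hf, hD]

-- the coupling invariant between A's sieve dict and B's list of found primes
def SieveInv (d : PySem.Dict Int (List Int)) (P : List Int) (n : Int) : Prop :=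
  (∀ c, d.get? c ≠ some []) ∧
  (∀ c p, p ∈ d.getD c [] → p ∈ P ∧ c = key n p) ∧
  (∀ p ∈ P, p ∈ d.getD (key n p) []) ∧
  (∀ p ∈ P, 2 ≤ p ∧ p < n) ∧
  P.Pairwise (· < ·)

-- the two primality tests agree under the invariant
lemma trialDiv_iff {P : List Int} {n : Int} (hbound : ∀ p ∈ P, 2 ≤ p) (hsort : P.Pairwise (· < ·)) :
    trialDiv n P = true ↔ ∀ p ∈ P, ¬(p * p ≤ n ∧ p ∣ n) := by
  induction P with
  | nil => simp [trialDiv]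
  | cons p ps ih =>
      have hp2 : 2 ≤ p := hbound p (by simp)
      rcases List.pairwise_cons.mp hsort with ⟨hlt, hsort'⟩
      have hunf : trialDiv n (p :: ps) =
          (if p * p > n then true else if PySem.Int.mod n p == 0 then false else trialDiv n ps) := rfl
      rw [hunf]
      by_cases hsq : p * p > n
      · rw [if_pos hsq]
        have hrest : ∀ q ∈ ps, ¬(q * q ≤ n ∧ q ∣ n) := by
          intro q hq hcon
          have := hlt q hq
          nlinarith [hcon.1]
        simp only [true_iff]
        intro q hq
        rcases List.mem_cons.mp hq with rfl | hq'
        · intro hcon; omega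
        · exact hrest q hq'
      · rw [if_neg hsq]
        by_cases hdvd : PySem.Int.mod n p = 0
        · have hd : p ∣ n := (PySem.Int.mod_eq_zero_iff_dvd n p).mp hdvd
          rw [if_pos (by simpa using hdvd)]
          simp only [Bool.false_eq_true, false_iff, not_forall]
          refine ⟨p, by simp, ?_⟩
          simp only [not_not]
          exact ⟨by omega, hd⟩
        · have hd : ¬ p ∣ n := fun h => hdvd ((PySem.Int.mod_eq_zero_iff_dvd n p).mpr h)
          rw [if_neg (by simpa using hdvd)]
          rw [ih (fun q hq => hbound q (by simp [hq])) hsort']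
          constructor
          · intro h q hq
            rcases List.mem_cons.mp hq with rfl | hq'
            · exact fun hcon => hd hcon.2
            · exact h q hq'
          · intro h q hq; exact h q (by simp [hq])

lemma inv_test {d : PySem.Dict Int (List Int)} {P : List Int} {n : Int}
    (hInv : SieveInv d P n) (_hn : 2 ≤ n) :
    (d.get? n = none ↔ trialDiv n P = true) ∧
    (∀ L, d.get? n = some L → L = d.getD n []) := by
  obtain ⟨h0, h1, h2, h3, h4⟩ := hInv
  have htd := trialDiv_iff (n := n) (fun p hp => (h3 p hp).1) h4
  constructor
  · rw [htd]
    constructor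
    · intro hnone p hp hcon
      have hp2 := (h3 p hp).1
      have hkey : key n p = n := (key_eq_self_iff (by omega)).mpr hcon
      have := h2 p hp
      rw [hkey, PySem.Dict.getD_eq_get?_getD, hnone] at this
      simp at this
    · intro hall
      cases hgd : d.get? n with
      | none => rfl
      | some L =>
          exfalso
          have hLne : L ≠ [] := h0 n ∘ (hgd ▸ congrArg some ·)
          rcases List.exists_mem_of_ne_nil L hLne with ⟨p, hpL⟩
          have hpD : p ∈ d.getD n [] := by rw [PySem.Dict.getD_eq_get?_getD, hgd]; exact hpL
          obtain ⟨hpP, hkey⟩ := h1 n p hpD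
          have hp2 := (h3 p hpP).1
          exact hall p hpP ((key_eq_self_iff (show (0:Int) < p by omega)).mp hkey.symm)
  · intro L hL
    rw [PySem.Dict.getD_eq_get?_getD, hL]; rfl

-- invariant preservation: prime step
lemma inv_prime_step {d : PySem.Dict Int (List Int)} {P : List Int} {n : Int}
    (hInv : SieveInv d P n) (hn : 2 ≤ n) (hnone : d.get? n = none) :
    SieveInv (d.insert (n*n) [n]) (P ++ [n]) (n+1) := by
  obtain ⟨h0, h1, h2, h3, h4⟩ := hInv
  have hgdn : d.getD n [] = [] := by rw [PySem.Dict.getD_eq_get?_getD, hnone]; rfl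
  have hkne : ∀ p ∈ P, key n p ≠ n := by
    intro p hp hk
    have := h2 p hp
    rw [hk, hgdn] at this
    simp at this
  have hshift : ∀ p ∈ P, key (n+1) p = key n p := fun p hp =>
    key_succ_of_ne (h3 p hp).1 (hkne p hp)
  have hksq : ∀ p ∈ P, key n p ≠ n * n := fun p hp =>
    ne_of_lt (key_lt_sq (h3 p hp).1 (h3 p hp).2)
  have hkself : key (n+1) n = n * n := key_succ_self hn
  have hgetD : ∀ c, (d.insert (n*n) [n]).getD c [] = if c = n*n then [n] else d.getD c [] := by
    intro c
    rw [PySem.Dict.getD_eq_get?_getD, PySem.Dict.get?_insert]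
    split_ifs with h
    · rfl
    · rw [← PySem.Dict.getD_eq_get?_getD]
  refine ⟨?_, ?_, ?_, ?_, ?_⟩
  · intro c
    rw [PySem.Dict.get?_insert]
    split_ifs with h
    · simp
    · exact h0 c
  · intro c p hp
    rw [hgetD] at hp
    split_ifs at hp with h
    · simp only [List.mem_singleton] at hp
      subst hp; subst h
      exact ⟨by simp, hkself.symm⟩
    · obtain ⟨hpP, hck⟩ := h1 c p hp
      exact ⟨by simp [hpP], by rw [hshift p hpP]; exact hck⟩
  · intro p hp
    rcases List.mem_append.mp hp with hpP | hpn
    · rw [hshift p hpP, hgetD, if_neg (hksq p hpP)]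
      exact h2 p hpP
    · simp only [List.mem_singleton] at hpn
      subst hpn
      rw [hkself, hgetD]
      simp
  · intro p hp
    rcases List.mem_append.mp hp with hpP | hpn
    · have := h3 p hpP; omega
    · simp only [List.mem_singleton] at hpn; omega
  · rw [List.pairwise_append]
    exact ⟨h4, List.pairwise_singleton _ _, fun p hp q hq => by
      simp only [List.mem_singleton] at hq; subst hq; exact (h3 p hp).2⟩

-- invariant preservation: composite step
lemma inv_comp_step {d : PySem.Dict Int (List Int)} {P : List Int} {n : Int} {L : List Int}
    (hInv : SieveInv d P n) (hn : 2 ≤ n) (hsome : d.get? n = some L) :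
    SieveInv ((sieveFold n d L).erase n) P (n+1) := by
  obtain ⟨h0, h1, h2, h3, h4⟩ := hInv
  have hLD : d.getD n [] = L := by rw [PySem.Dict.getD_eq_get?_getD, hsome]; rfl
  have hLmem : ∀ p ∈ L, p ∈ P ∧ p ∣ n ∧ p * p ≤ n ∧ 2 ≤ p := by
    intro p hp
    obtain ⟨hpP, hck⟩ := h1 n p (hLD ▸ hp)
    have hp2 := (h3 p hpP).1
    obtain ⟨hsq, hdvd⟩ := (key_eq_self_iff (show (0:Int) < p by omega)).mp hck.symm
    exact ⟨hpP, hdvd, hsq, hp2⟩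
  have hLkey : ∀ p ∈ L, key (n+1) p = n + p := by
    intro p hp
    obtain ⟨_, hdvd, hsq, hp2⟩ := hLmem p hp
    exact key_succ_of_dvd hp2 hdvd hsq
  -- lookup in the new dict, for c ≠ n
  have hget2 : ∀ c, c ≠ n → ((sieveFold n d L).erase n).getD c [] =
      (if L.filter (fun p => p + n == c) = [] then d.getD c []
       else d.getD c [] ++ L.filter (fun p => p + n == c)) := by
    intro c hc
    rw [PySem.Dict.getD_eq_get?_getD, get?_erase_of_ne _ hc, sieveFold_get?]
    split_ifs with h
    · rw [← PySem.Dict.getD_eq_get?_getD]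
    · rfl
  have hgetn : ((sieveFold n d L).erase n).getD n [] = [] := by
    rw [PySem.Dict.getD_eq_get?_getD, get?_erase_self]; rfl
  refine ⟨?_, ?_, ?_, ?_, ?_⟩
  · intro c
    by_cases hc : c = n
    · subst hc; rw [get?_erase_self]; simp
    · rw [get?_erase_of_ne _ hc, sieveFold_get?]
      split_ifs with h
      · exact h0 c
      · simp [h]
  · intro c p hp
    by_cases hc : c = n
    · subst hc; rw [hgetn] at hp; simp at hp
    · rw [hget2 c hc] at hp
      split_ifs at hp with h
      · obtain ⟨hpP, hck⟩ := h1 c p hp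
        refine ⟨hpP, ?_⟩
        rw [key_succ_of_ne (h3 p hpP).1 (fun hkn => hc (hck.trans hkn)), ← hck]
      · rcases List.mem_append.mp hp with hp' | hp'
        · obtain ⟨hpP, hck⟩ := h1 c p hp'
          refine ⟨hpP, ?_⟩
          rw [key_succ_of_ne (h3 p hpP).1 (fun hkn => hc (hck.trans hkn)), ← hck]
        · obtain ⟨hpL, hpc⟩ := List.mem_filter.mp hp'
          have hpc' : p + n = c := by simpa using hpc
          refine ⟨(hLmem p hpL).1, ?_⟩
          rw [hLkey p hpL]; omega
  · intro p hpP
    by_cases hpL : p ∈ L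
    · have hc : key (n+1) p = n + p := hLkey p hpL
      have hcne : n + p ≠ n := by have := (hLmem p hpL).2.2.2; omega
      rw [hc, hget2 _ hcne]
      have hpf : p ∈ L.filter (fun q => q + n == n + p) := by
        rw [List.mem_filter]
        exact ⟨hpL, by simp; ring⟩
      have hfne : L.filter (fun q => q + n == n + p) ≠ [] := by
        intro h; rw [h] at hpf; simp at hpf
      rw [if_neg hfne]
      exact List.mem_append_right _ hpf
    · have hkn : key n p ≠ n := by
        intro h
        have := h2 p hpP
        rw [h, hLD] at this
        exact hpL this
      have hc : key (n+1) p = key n p := key_succ_of_ne (h3 p hpP).1 hkn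
      rw [hc, hget2 _ hkn]
      split_ifs with h
      · exact h2 p hpP
      · exact List.mem_append_left _ (h2 p hpP)
  · intro p hp
    have := h3 p hp; omega
  · exact h4

lemma go_eq (m : Int) (fuel : Nat) : ∀ (d : PySem.Dict Int (List Int)) (P : List Int)
    (s : List Char) (n : Int), SieveInv d P n → 2 ≤ n →
    goA m fuel d s n = goB m fuel P s n := by
  induction fuel with
  | zero => intro d P s n _ _; rfl
  | succ fuel ih =>
      intro d P s n hInv hn
      obtain ⟨hiff, hsome⟩ := inv_test hInv hn
      cases hg : d.get? n with
      | none =>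
          have htd : trialDiv n P = true := hiff.mp hg
          simp only [goA, goB, hg, htd, if_true]
          split_ifs with hl
          · rfl
          · exact ih _ _ _ _ (inv_prime_step hInv hn hg) (by omega)
      | some L =>
          have htd : trialDiv n P = false := by
            cases h : trialDiv n P
            · rfl
            · rw [← hiff] at h; rw [h] at hg; cases hg
          simp only [goA, goB, hg, htd, if_false, Bool.false_eq_true]
          exact ih _ _ _ _ (inv_comp_step hInv hn hg) (by omega)

lemma inv_init : SieveInv PySem.Dict.empty [] 2 := by
  refine ⟨?_, ?_, ?_, ?_, ?_⟩ <;> simp [PySem.Dict.getD_eq_get?_getD, PySem.Dict.get?_empty]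

-- ===== VERDICT (by name: the statement is the Claim_ definition above) =====
theorem get_primes_string_spec : Claim_equal_get_primes_string := by
  intro m _
  unfold Spec_get_primes_string get_primes_string get_primes_string_alt
  rw [go_eq m (pyFuel m) PySem.Dict.empty [] [] 2 inv_init (by omega)]
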